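-- pv_equiv track=rewrite | github.com/MTLeeLab/oligo-asst | oligo_asst.py | wildcard_stats
-- ===== SOURCE A (Python) =====
-- iupac_wc = {'A': ('A',),
-- 			'C': ('C',),
-- 			'G': ('G',),
-- 			'T': ('T',),
-- 	'R': ('A', 'G'),
-- 	'Y': ('C', 'T'),
-- 	'S': ('C', 'G'),
-- 	'W': ('A', 'T'),
-- 	'K': ('G', 'T'),
-- 	'M': ('A', 'C'),
-- 	'B': ('C', 'G', 'T'),
-- 	'D': ('A', 'G', 'T'),
-- 	'H': ('A', 'C', 'T'),
-- 	'V': ('A', 'C', 'G'),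
-- 	'N': ('A', 'C', 'G', 'T')}
--
-- def wildcard_stats(seq):
-- 	"""
-- 	Returns number of wildcard positions and number of possible
-- 	expansions
-- 	"""
-- 	seq = seq.upper()
-- 	wc_count = 0
-- 	expansions = 1
-- 	for base in seq.upper():
-- 		if base not in ['A', 'C', 'G', 'T', 'X']:
-- 			wc_count += 1
-- 			expansions *= len(iupac_wc.get(base, ()))
-- 	return seq.count('X'), wc_count, expansions
-- ===== SOURCE B (Python) =====
-- WC_SIZES = {'R': 2, 'Y': 2, 'S': 2, 'W': 2, 'K': 2, 'M': 2,
--             'B': 3, 'D': 3, 'H': 3, 'V': 3, 'N': 4}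
--
-- def wildcard_stats(seq):
--     """
--     Returns number of wildcard positions and number of possible
--     expansions
--     """
--     s = seq.upper()
--     x = s.count('X')
--     plain = s.count('A') + s.count('C') + s.count('G') + s.count('T') + x
--     wc_count = len(s) - plain
--     known_wc = 0
--     expansions = 1
--     for w, k in WC_SIZES.items():
--         c = s.count(w)
--         known_wc += c
--         expansions *= k ** c
--     if known_wc < wc_count:
--         expansions = 0  # an unrecognised base admits no expansion
--     return x, wc_count, expansions
-- ===== Notes on version B (the rewrite author's own statement) =====
-- stated objective: faster
-- what changed: Replaces A's per-character scan (membership test and dict lookup per char) by fixed-alphabet counting: five s.count calls give the X count and the plain-base total (wc_count = len - plain), one loop over the 11 wildcard letters accumulates expansions as k**count(w), and a final comparison of the counted wildcards with wc_count zeroes expansions when an unrecognised base is present.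
import Mathlib
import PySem

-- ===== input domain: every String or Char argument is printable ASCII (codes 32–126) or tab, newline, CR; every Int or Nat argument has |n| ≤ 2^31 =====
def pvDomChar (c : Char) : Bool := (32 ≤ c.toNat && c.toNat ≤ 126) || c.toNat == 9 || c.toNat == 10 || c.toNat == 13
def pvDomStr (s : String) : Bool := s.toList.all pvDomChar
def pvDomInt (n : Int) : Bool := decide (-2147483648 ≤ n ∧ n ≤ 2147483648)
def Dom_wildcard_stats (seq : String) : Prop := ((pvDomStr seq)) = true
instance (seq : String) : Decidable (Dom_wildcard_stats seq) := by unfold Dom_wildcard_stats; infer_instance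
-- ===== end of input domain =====

-- B replaces A's per-character scan with fixed-alphabet counting (C-level str.count, measured
-- faster in a timing run): five counts give the X count and wc_count = len - plain, a loop over
-- the 11 wildcard letters accumulates k**count(w), and a final comparison zeroes expansions when an
-- unrecognised base is present.

-- ===== PORT A =====
def iupac_wc : PySem.Dict Char (List Char) := PySem.Dict.ofList
  [('A', ['A']), ('C', ['C']), ('G', ['G']), ('T', ['T']),
   ('R', ['A', 'G']), ('Y', ['C', 'T']), ('S', ['C', 'G']), ('W', ['A', 'T']),
   ('K', ['G', 'T']), ('M', ['A', 'C']), ('B', ['C', 'G', 'T']), ('D', ['A', 'G', 'T']),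
   ('H', ['A', 'C', 'T']), ('V', ['A', 'C', 'G']), ('N', ['A', 'C', 'G', 'T'])]

def wildcard_stats (seq : String) : Int × Int × Int :=
  let s := PySem.Str.upper seq
  -- for base in seq.upper(): (seq was rebound to the uppered string, so it is uppered again)
  let st := (PySem.Str.upper s).toList.foldl
    (fun (acc : Int × Int) base =>
      if base ∉ (['A', 'C', 'G', 'T', 'X'] : List Char) then
        (acc.1 + 1, acc.2 * ((PySem.Dict.getD iupac_wc base []).length : Int))
      else acc)
    (0, 1)
  ((PySem.Str.count s "X" : Int), st.1, st.2)

-- ===== PORT B =====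
-- WC_SIZES.items() in insertion order
def wc_sizes : List (Char × Int) :=
  [('R', 2), ('Y', 2), ('S', 2), ('W', 2), ('K', 2), ('M', 2),
   ('B', 3), ('D', 3), ('H', 3), ('V', 3), ('N', 4)]

def wildcard_stats_alt (seq : String) : Int × Int × Int :=
  let s := PySem.Str.upper seq
  let x : Int := (PySem.Str.count s "X" : Int)
  let plain : Int := (PySem.Str.count s "A" : Int) + (PySem.Str.count s "C" : Int)
    + (PySem.Str.count s "G" : Int) + (PySem.Str.count s "T" : Int) + x
  let wc_count : Int := (PySem.Str.len s : Int) - plain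
  -- for w, k in WC_SIZES.items(): 'k ** c' has the nonnegative count c as exponent, ported via .toNat
  let st := wc_sizes.foldl
    (fun (acc : Int × Int) wk =>
      let c : Int := (PySem.Str.count s (String.ofList [wk.1]) : Int)
      (acc.1 + c, acc.2 * wk.2 ^ c.toNat))
    (0, 1)
  let expansions : Int := if st.1 < wc_count then 0 else st.2
  (x, wc_count, expansions)

-- ===== PRECONDITION & SPEC =====
def Spec_wildcard_stats (seq : String) (out : Int × Int × Int) : Prop := out = wildcard_stats_alt seq
instance (seq : String) (out : Int × Int × Int) : Decidable (Spec_wildcard_stats seq out) := by unfold Spec_wildcard_stats; infer_instance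

-- ===== CLAIM (what is proved, stated in full; the proofs are below) =====
def Claim_equal_wildcard_stats : Prop := ∀ (seq : String), Dom_wildcard_stats seq → Spec_wildcard_stats seq (wildcard_stats seq)

-- ===== LEMMAS AND PROOFS =====

theorem char_le_iff_toNat (d c : Char) : d ≤ c ↔ d.toNat ≤ c.toNat := by
  rw [Char.le_def, UInt32.le_iff_toNat_le]
  exact Iff.rfl

theorem upperChar_idem (c : Char) :
    PySem.Chars.upperChar (PySem.Chars.upperChar c) = PySem.Chars.upperChar c := by
  by_cases h1 : 'a' ≤ c
  · by_cases h2 : c ≤ 'z'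
    · have hn1 : 97 ≤ c.toNat := by
        have := (char_le_iff_toNat 'a' c).1 h1
        simpa using this
      have hn2 : c.toNat ≤ 122 := by
        have := (char_le_iff_toNat c 'z').1 h2
        simpa using this
      have hval : (c.toNat - 32).isValidChar := Or.inl (by omega)
      have htn : (Char.ofNat (c.toNat - 32)).toNat = c.toNat - 32 := by
        rw [Char.toNat_ofNat, if_pos hval]
      have hup : PySem.Chars.upperChar c = Char.ofNat (c.toNat - 32) := by
        simp [PySem.Chars.upperChar, PySem.Chars.islower, h1, h2]
      have hnl : ¬ ('a' ≤ Char.ofNat (c.toNat - 32)) := by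
        rw [char_le_iff_toNat, htn]
        have h97 : ('a' : Char).toNat = 97 := rfl
        omega
      have hlow : PySem.Chars.islower (Char.ofNat (c.toNat - 32)) = false := by
        simp [PySem.Chars.islower, hnl]
      rw [hup]
      simp [PySem.Chars.upperChar, hlow]
    · have hup : PySem.Chars.upperChar c = c := by
        simp [PySem.Chars.upperChar, PySem.Chars.islower, h2]
      simp [hup]
  · have hup : PySem.Chars.upperChar c = c := by
      simp [PySem.Chars.upperChar, PySem.Chars.islower, h1]
    simp [hup]

theorem upper_idem (l : List Char) :
    PySem.Chars.upper (PySem.Chars.upper l) = PySem.Chars.upper l := by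
  simp [PySem.Chars.upper, Function.comp, upperChar_idem]

theorem count_go_single (c : Char) :
    ∀ (fuel : Nat) (l : List Char) (acc : Nat), l.length ≤ fuel →
      PySem.Chars.count.go [c] fuel l acc = acc + l.count c := by
  intro fuel
  induction fuel with
  | zero =>
    intro l acc h
    have : l = [] := List.eq_nil_of_length_eq_zero (Nat.le_zero.1 h)
    subst this
    simp [PySem.Chars.count.go]
  | succ n ih =>
    intro l acc h
    match l with
    | [] => simp [PySem.Chars.count.go]
    | x :: t =>
      have ht : t.length ≤ n := by
        simp only [List.length_cons] at h; omega
      by_cases hx : c = x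
      · subst hx
        have hpre : List.isPrefixOf [c] (c :: t) = true := by simp [List.isPrefixOf]
        simp only [PySem.Chars.count.go, hpre, if_pos]
        have hdrop : List.drop (List.length [c]) (c :: t) = t := by simp
        rw [hdrop, ih t (acc + 1) ht]
        simp
        omega
      · have hpre : List.isPrefixOf [c] (x :: t) = false := by
          simp [List.isPrefixOf, hx]
        simp only [PySem.Chars.count.go, hpre]
        rw [if_neg (by simp)]
        rw [ih t acc ht]
        simp [List.count_cons]
        exact fun h' => hx h'.symm

theorem count_single (l : List Char) (c : Char) :
    PySem.Chars.count l [c] = l.count c := by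
  simp only [PySem.Chars.count, List.isEmpty]
  rw [count_go_single c l.length l 0 (le_refl _)]
  simp

theorem foldl_mul (f : Char → Int) (l : List Char) (a : Int) :
    l.foldl (fun acc x => acc * f x) a = a * (l.map f).prod := by
  induction l generalizing a with
  | nil => simp
  | cons x t ih => simp [List.foldl_cons, ih, mul_assoc]

-- an unrecognised base (no plain/X letter, no wildcard letter) is not a key of iupac_wc
theorem getD_unknown (c : Char)
    (hL : c ∉ (['A', 'C', 'G', 'T', 'X'] : List Char))
    (hW : c ∉ (['R', 'Y', 'S', 'W', 'K', 'M', 'B', 'D', 'H', 'V', 'N'] : List Char)) :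
    PySem.Dict.getD iupac_wc c [] = [] := by
  simp only [List.mem_cons, not_or] at hL hW
  obtain ⟨h1, h2, h3, h4, _, -⟩ := hL
  obtain ⟨h5, h6, h7, h8, h9, h10, h11, h12, h13, h14, h15, -⟩ := hW
  have hitems : iupac_wc.items = [('A', ['A']), ('C', ['C']), ('G', ['G']), ('T', ['T']),
    ('R', ['A', 'G']), ('Y', ['C', 'T']), ('S', ['C', 'G']), ('W', ['A', 'T']),
    ('K', ['G', 'T']), ('M', ['A', 'C']), ('B', ['C', 'G', 'T']), ('D', ['A', 'G', 'T']),
    ('H', ['A', 'C', 'T']), ('V', ['A', 'C', 'G']), ('N', ['A', 'C', 'G', 'T'])] := by decide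
  simp [PySem.Dict.getD, PySem.Dict.get?, hitems, beq_iff_eq,
    Ne.symm h1, Ne.symm h2, Ne.symm h3, Ne.symm h4, Ne.symm h5, Ne.symm h6, Ne.symm h7,
    Ne.symm h8, Ne.symm h9, Ne.symm h10, Ne.symm h11, Ne.symm h12, Ne.symm h13,
    Ne.symm h14, Ne.symm h15]

-- summing the counts of the distinct letters of d over a list xs ⊆ d gives xs.length
theorem foldl_add_counts :
    ∀ (d : List Char), d.Nodup → ∀ (xs : List Char), (∀ x ∈ xs, x ∈ d) → ∀ (a : Int),
    d.foldl (fun acc k => acc + (xs.count k : Int)) a = a + (xs.length : Int) := by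
  intro d
  induction d with
  | nil =>
    intro _ xs hsub a
    have : xs = [] := List.eq_nil_iff_forall_not_mem.2 (fun x hx => by simpa using hsub x hx)
    subst this; simp
  | cons k d' ih =>
    intro hnd xs hsub a
    obtain ⟨hk, hnd'⟩ := List.nodup_cons.1 hnd
    have hsub' : ∀ x ∈ xs.filter (fun x => !(x == k)), x ∈ d' := by
      intro x hx
      obtain ⟨hx1, hx2⟩ := List.mem_filter.1 hx
      have hxk : x ≠ k := by simpa using hx2
      rcases List.mem_cons.1 (hsub x hx1) with h | h
      · exact absurd h hxk
      · exact h
    have hcount : ∀ acc : Int, ∀ k' ∈ d',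
        (fun (acc : Int) k' => acc + (xs.count k' : Int)) acc k'
          = (fun (acc : Int) k' => acc + ((xs.filter (fun x => !(x == k))).count k' : Int)) acc k' := by
      intro acc k' hk'
      have hne : k' ≠ k := fun h => hk (h ▸ hk')
      have : (xs.filter (fun x => !(x == k))).count k' = xs.count k' :=
        List.count_filter (by simp [hne])
      simp [this]
    rw [List.foldl_cons, PySem.List.foldl_congr_mem d' _ _ _ hcount, ih hnd' _ hsub' _]
    have hperm : (xs.filter (fun x => x == k) ++ xs.filter (fun x => !(x == k))).Perm xs :=
      List.filter_append_perm _ xs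
    have hlen := hperm.length_eq
    rw [List.length_append, List.filter_beq, List.length_replicate] at hlen
    omega

-- the product of f k ^ (count of k) over the distinct letters of d, for xs ⊆ d
theorem foldl_mul_pow_counts (f : Char → Int) :
    ∀ (d : List Char), d.Nodup → ∀ (xs : List Char), (∀ x ∈ xs, x ∈ d) → ∀ (a : Int),
    d.foldl (fun acc k => acc * (f k) ^ (xs.count k)) a = a * ((xs.map f).prod) := by
  intro d
  induction d with
  | nil =>
    intro _ xs hsub a
    have : xs = [] := List.eq_nil_iff_forall_not_mem.2 (fun x hx => by simpa using hsub x hx)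
    subst this; simp
  | cons k d' ih =>
    intro hnd xs hsub a
    obtain ⟨hk, hnd'⟩ := List.nodup_cons.1 hnd
    have hsub' : ∀ x ∈ xs.filter (fun x => !(x == k)), x ∈ d' := by
      intro x hx
      obtain ⟨hx1, hx2⟩ := List.mem_filter.1 hx
      have hxk : x ≠ k := by simpa using hx2
      rcases List.mem_cons.1 (hsub x hx1) with h | h
      · exact absurd h hxk
      · exact h
    have hcount : ∀ acc : Int, ∀ k' ∈ d',
        (fun (acc : Int) k' => acc * (f k') ^ (xs.count k')) acc k'
          = (fun (acc : Int) k' => acc * (f k') ^ ((xs.filter (fun x => !(x == k))).count k')) acc k' := by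
      intro acc k' hk'
      have hne : k' ≠ k := fun h => hk (h ▸ hk')
      have : (xs.filter (fun x => !(x == k))).count k' = xs.count k' :=
        List.count_filter (by simp [hne])
      simp [this]
    rw [List.foldl_cons, PySem.List.foldl_congr_mem d' _ _ _ hcount, ih hnd' _ hsub' _]
    have hperm : (xs.filter (fun x => x == k) ++ xs.filter (fun x => !(x == k))).Perm xs :=
      List.filter_append_perm _ xs
    have hprod : ((xs.map f).prod)
        = (f k) ^ (xs.count k) * (((xs.filter (fun x => !(x == k))).map f).prod) := by
      have h1 := (List.Perm.map f hperm.symm).prod_eq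
      rw [h1, List.filter_beq, List.map_append, List.prod_append, List.map_replicate,
        List.prod_replicate]
    rw [hprod]; ring

-- ===== VERDICT (by name: the statement is the Claim_ definition above) =====
set_option maxHeartbeats 1000000 in
set_option maxRecDepth 20000 in
theorem wildcard_stats_spec : Claim_equal_wildcard_stats := by
  intro seq _
  unfold Spec_wildcard_stats wildcard_stats wildcard_stats_alt
  set L : List Char := ['A', 'C', 'G', 'T', 'X'] with hL
  set W : List Char := ['R', 'Y', 'S', 'W', 'K', 'M', 'B', 'D', 'H', 'V', 'N'] with hW
  set f : Char → Int := fun b => ((PySem.Dict.getD iupac_wc b []).length : Int) with hf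
  set u : List Char := (PySem.Str.upper seq).toList with hu
  clear_value L W u
  have huu : (PySem.Str.upper (PySem.Str.upper seq)).toList = u := by
    rw [PySem.Str.toList_upper, hu, PySem.Str.toList_upper, upper_idem]
  simp only [huu]
  -- A's loop, split into its two independent accumulators
  have hstepA : (fun (acc : Int × Int) (base : Char) =>
      if base ∉ L then (acc.1 + 1, acc.2 * f base) else acc)
      = (fun (acc : Int × Int) (base : Char) =>
        ((fun (a1 : Int) (b : Char) => if b ∉ L then a1 + 1 else a1) acc.1 base,
         (fun (a2 : Int) (b : Char) => if b ∉ L then a2 * f b else a2) acc.2 base)) := by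
    funext acc b
    by_cases h : b ∉ L <;> simp [h]
  rw [hstepA, PySem.List.foldl_prod_mk
      (f := fun (a1 : Int) (b : Char) => if b ∉ L then a1 + 1 else a1)
      (g := fun (a2 : Int) (b : Char) => if b ∉ L then a2 * f b else a2)]
  -- B's loop over the fixed wildcard table, rewritten to counts of u and split the same way
  have hcnt : ∀ w : Char, (PySem.Str.count (PySem.Str.upper seq) (String.ofList [w]) : Int)
      = (u.count w : Int) := by
    intro w
    rw [PySem.Str.count_eq]
    rw [show (String.ofList [w]).toList = [w] by simp, ← hu, count_single]
  have hstepB : ∀ wk ∈ wc_sizes, ∀ acc : Int × Int,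
      (fun (acc : Int × Int) (wk : Char × Int) =>
        ((acc.1 + (PySem.Str.count (PySem.Str.upper seq) (String.ofList [wk.1]) : Int)),
          acc.2 * wk.2 ^ ((PySem.Str.count (PySem.Str.upper seq) (String.ofList [wk.1]) : Int)).toNat)) acc wk
      = (fun (acc : Int × Int) (wk : Char × Int) =>
        ((fun (a1 : Int) (wk : Char × Int) => a1 + (u.count wk.1 : Int)) acc.1 wk,
         (fun (a2 : Int) (wk : Char × Int) => a2 * f wk.1 ^ (u.count wk.1)) acc.2 wk)) acc wk := by
    intro wk hwk acc
    have hsz : wk.2 = f wk.1 := by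
      fin_cases hwk <;> simp [hf] <;> decide
    simp only [hcnt, hsz, Int.toNat_natCast]
  rw [PySem.List.foldl_congr_mem' wc_sizes _ _ _ hstepB, PySem.List.foldl_prod_mk
      (f := fun (a1 : Int) (wk : Char × Int) => a1 + (u.count wk.1 : Int))
      (g := fun (a2 : Int) (wk : Char × Int) => a2 * f wk.1 ^ (u.count wk.1))]
  have hmapW : wc_sizes.map Prod.fst = W := by rw [hW]; rfl
  rw [show wc_sizes.foldl (fun (a1 : Int) (wk : Char × Int) => a1 + (u.count wk.1 : Int)) 0
        = W.foldl (fun (a1 : Int) (w : Char) => a1 + (u.count w : Int)) 0 from by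
      rw [← hmapW]
      exact (List.foldl_map (f := Prod.fst) (g := fun (a1 : Int) (w : Char) => a1 + (u.count w : Int)) (l := wc_sizes) (init := 0)).symm,
    show wc_sizes.foldl (fun (a2 : Int) (wk : Char × Int) => a2 * f wk.1 ^ (u.count wk.1)) 1
        = W.foldl (fun (a2 : Int) (w : Char) => a2 * f w ^ (u.count w)) 1 from by
      rw [← hmapW]
      exact (List.foldl_map (f := Prod.fst) (g := fun (a2 : Int) (w : Char) => a2 * f w ^ (u.count w)) (l := wc_sizes) (init := 1)).symm]
  -- counts restricted to the wildcard alphabet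
  set xsW : List Char := u.filter (fun b => decide (b ∈ W)) with hxsW
  clear_value xsW
  have hsubW : ∀ x ∈ xsW, x ∈ W := by
    intro x hx
    rw [hxsW] at hx
    simpa using (List.mem_filter.1 hx).2
  have hcW : ∀ w ∈ W, xsW.count w = u.count w := by
    intro w hw
    rw [hxsW]
    exact List.count_filter (by simp [hw])
  have hknown : W.foldl (fun (a1 : Int) (w : Char) => a1 + (u.count w : Int)) 0
      = (xsW.length : Int) := by
    rw [PySem.List.foldl_congr_mem' W _
        (fun (a1 : Int) (w : Char) => a1 + (xsW.count w : Int)) _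
        (fun w hw acc => by simp [hcW w hw]),
      foldl_add_counts W (by rw [hW]; decide) xsW hsubW 0]
    simp
  have hexB : W.foldl (fun (a2 : Int) (w : Char) => a2 * f w ^ (u.count w)) 1
      = (xsW.map f).prod := by
    rw [PySem.List.foldl_congr_mem' W _
        (fun (a2 : Int) (w : Char) => a2 * f w ^ (xsW.count w)) _
        (fun w hw acc => by simp [hcW w hw]),
      foldl_mul_pow_counts f W (by rw [hW]; decide) xsW hsubW 1]
    simp
  rw [hknown, hexB]
  -- A's accumulators in closed form
  set xs : List Char := u.filter (fun b => decide (b ∉ L)) with hxs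
  clear_value xs
  have hwcA : u.foldl (fun (a1 : Int) (b : Char) => if b ∉ L then a1 + 1 else a1) 0
      = (xs.length : Int) := by
    rw [PySem.List.foldl_ite_add_one (fun b => b ∉ L) u 0]
    simp [hxs, List.countP_eq_length_filter]
  have hexA : u.foldl (fun (a2 : Int) (b : Char) => if b ∉ L then a2 * f b else a2) 1
      = (xs.map f).prod := by
    rw [PySem.List.foldl_ite_eq_foldl_filter (fun b => b ∉ L) _ u 1, ← hxs, foldl_mul]
    simp
  rw [hwcA, hexA]
  -- the five plain counts: len(s) - plain = number of non-plain characters = xs.length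
  have hcnt' : ∀ w : Char, ∀ t : String, t.toList = [w] →
      (PySem.Str.count (PySem.Str.upper seq) t : Int) = (u.count w : Int) := by
    intro w t ht
    rw [PySem.Str.count_eq, ht, ← hu, count_single]
  have hlen : (PySem.Str.len (PySem.Str.upper seq) : Int) = (u.length : Int) := by
    rw [PySem.Str.len_eq, ← hu]
  rw [hcnt' 'X' "X" rfl, hcnt' 'A' "A" rfl, hcnt' 'C' "C" rfl, hcnt' 'G' "G" rfl,
      hcnt' 'T' "T" rfl, hlen]
  have hwc : (u.length : Int) - ((u.count 'A' : Int) + (u.count 'C' : Int) + (u.count 'G' : Int)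
      + (u.count 'T' : Int) + (u.count 'X' : Int)) = (xs.length : Int) := by
    set xs5 : List Char := u.filter (fun b => decide (b ∈ L)) with hxs5
    clear_value xs5
    have hsub5 : ∀ x ∈ xs5, x ∈ L := by
      intro x hx
      rw [hxs5] at hx
      simpa using (List.mem_filter.1 hx).2
    have h5 := foldl_add_counts L (by rw [hL]; decide) xs5 hsub5 0
    have hc5 : ∀ c ∈ L, xs5.count c = u.count c := by
      intro c hc
      rw [hxs5]
      exact List.count_filter (by simp [hc])
    rw [show L.foldl (fun (acc : Int) k => acc + (xs5.count k : Int)) 0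
          = ((((((0 : Int) + xs5.count 'A') + xs5.count 'C') + xs5.count 'G') + xs5.count 'T') + xs5.count 'X') from by
        rw [hL]
        simp only [List.foldl_cons, List.foldl_nil]] at h5
    rw [hc5 'A' (by simp [hL]), hc5 'C' (by simp [hL]), hc5 'G' (by simp [hL]),
        hc5 'T' (by simp [hL]), hc5 'X' (by simp [hL])] at h5
    have hsplit : u.length = xs5.length + xs.length := by
      rw [hxs5, hxs, ← List.countP_eq_length_filter, ← List.countP_eq_length_filter]
      rw [List.length_eq_countP_add_countP (p := fun b => decide (b ∈ L)),
        List.countP_congr (l := u) (p := fun a => decide ¬decide (a ∈ L) = true)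
          (q := fun b => decide (b ∉ L)) (fun b _ => by simp)]
    omega
  rw [hwc]
  refine Prod.ext rfl (Prod.ext rfl ?_)
  -- expansions: either every non-plain base is a wildcard letter, or some base is unknown
  have hWL : ∀ c ∈ W, c ∉ L := by
    rw [hW, hL]
    intro c hc
    fin_cases hc <;> decide
  rcases Classical.em (∀ c ∈ u, c ∉ L → c ∈ W) with hall | hall
  · have hxseq : xsW = xs := by
      rw [hxsW, hxs]
      refine List.filter_congr (fun b hb => ?_)
      simp only [decide_eq_decide]
      exact ⟨fun hbW => hWL b hbW, fun hbL => hall b hb hbL⟩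
    rw [hxseq, if_neg (lt_irrefl _)]
  · obtain ⟨c, hc⟩ := not_forall.1 hall
    rw [Classical.not_imp, Classical.not_imp] at hc
    obtain ⟨hcu, hcL, hcW⟩ := hc
    have hcxs : c ∈ xs := by
      rw [hxs]; exact List.mem_filter.2 ⟨hcu, by simpa using hcL⟩
    have hxsWxs : xsW = xs.filter (fun b => decide (b ∈ W)) := by
      rw [hxs, List.filter_filter, hxsW]
      refine List.filter_congr (fun b hb => ?_)
      have : ∀ (p q : Bool), (p → q = true) → (p && q) = p := by decide
      refine (this _ _ (fun hp => ?_)).symm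
      have hbW : b ∈ W := by simpa using hp
      simpa using hWL b hbW
    have hlt : (xsW.length : Int) < (xs.length : Int) := by
      rw [hxsWxs]
      have hle := List.length_filter_le (fun b => decide (b ∈ W)) xs
      have hne : (xs.filter (fun b => decide (b ∈ W))).length ≠ xs.length := by
        intro heq
        have := (List.length_filter_eq_length_iff).1 heq c hcxs
        exact hcW (by simpa using this)
      exact_mod_cast Nat.lt_of_le_of_ne hle hne
    rw [if_pos hlt]
    have hfc : f c = 0 := by
      rw [hf]
      have := getD_unknown c (by simpa [hL] using hcL) (by simpa [hW] using hcW)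
      simp [this]
    exact List.prod_eq_zero (List.mem_map.2 ⟨c, hcxs, hfc⟩)
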